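-- pv_equiv track=rewrite | github.com/MrBrantCode/unitest_baseline | mut_generate/mist_train_cf/cf_66455/solution.py | volume_increase
-- ===== SOURCE A (Python) =====
-- def volume_increase(length, width, height):
--     initial_volume = length * width * height
--     for _ in range(3):
--         length += 2
--     for _ in range(5):
--         width += 3
--     for _ in range(4):
--         height += 1
--     final_volume = length * width * height
--     volume_increase = final_volume - initial_volume
--     return volume_increase
-- ===== SOURCE B (Python) =====
-- def volume_increase(length, width, height):
--     # Decompose the added volume directly: the enlarged box minus the original
--     # box consists of 3 face slabs, 3 edge bars and 1 corner block.
--     dl, dw, dh = 2 * 3, 3 * 5, 1 * 4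
--     slabs = dl * width * height + length * dw * height + length * width * dh
--     bars = dl * dw * height + dl * dh * width + dw * dh * length
--     corner = dl * dw * dh
--     return slabs + bars + corner
-- ===== Notes on version B (the rewrite author's own statement) =====
-- stated objective: alternative
-- what changed: Instead of computing the initial and final volumes and subtracting (via three constant-adding loops), B computes the added volume directly by geometric decomposition: it sums the 3 face slabs, 3 edge bars and 1 corner block created by the dimension increments, never forming either box volume.
import Mathlib
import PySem

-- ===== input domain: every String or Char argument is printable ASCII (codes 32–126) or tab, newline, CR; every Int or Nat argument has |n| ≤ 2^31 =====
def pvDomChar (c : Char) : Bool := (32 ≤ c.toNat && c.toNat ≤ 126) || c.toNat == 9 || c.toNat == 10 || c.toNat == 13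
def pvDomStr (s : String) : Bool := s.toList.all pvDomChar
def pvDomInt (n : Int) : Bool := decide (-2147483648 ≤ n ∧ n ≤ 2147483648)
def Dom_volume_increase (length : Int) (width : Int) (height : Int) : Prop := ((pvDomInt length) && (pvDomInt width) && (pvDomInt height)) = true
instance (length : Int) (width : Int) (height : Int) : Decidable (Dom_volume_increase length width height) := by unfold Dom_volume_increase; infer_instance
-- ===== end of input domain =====

-- ===== PORT A =====
-- B changes: computes the added volume by geometric decomposition (3 slabs + 3 bars + 1 corner)
-- instead of subtracting two box volumes built via constant-adding loops (alternative).
def volume_increase (length : Int) (width : Int) (height : Int) : Int :=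
  let initial_volume := length * width * height
  let length := (PySem.List.pyRange 0 3 1).foldl (fun l _ => l + 2) length
  let width := (PySem.List.pyRange 0 5 1).foldl (fun w _ => w + 3) width
  let height := (PySem.List.pyRange 0 4 1).foldl (fun h _ => h + 1) height
  let final_volume := length * width * height
  let vi := final_volume - initial_volume
  vi

-- ===== PORT B =====
def volume_increase_alt (length : Int) (width : Int) (height : Int) : Int :=
  let dl := 2 * 3
  let dw := 3 * 5
  let dh := 1 * 4
  let slabs := dl * width * height + length * dw * height + length * width * dh
  let bars := dl * dw * height + dl * dh * width + dw * dh * length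
  let corner := dl * dw * dh
  slabs + bars + corner

-- ===== PRECONDITION & SPEC =====
def Spec_volume_increase (length : Int) (width : Int) (height : Int) (out : Int) : Prop := out = volume_increase_alt length width height
instance (length : Int) (width : Int) (height : Int) (out : Int) : Decidable (Spec_volume_increase length width height out) := by unfold Spec_volume_increase; infer_instance

-- ===== CLAIM (what is proved, stated in full; the proofs are below) =====
def Claim_equal_volume_increase : Prop := ∀ (length : Int) (width : Int) (height : Int), Dom_volume_increase length width height → Spec_volume_increase length width height (volume_increase length width height)

-- ===== LEMMAS AND PROOFS =====

-- ===== VERDICT (by name: the statement is the Claim_ definition above) =====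
theorem volume_increase_spec : Claim_equal_volume_increase := by
  intro length width height _
  show volume_increase length width height = volume_increase_alt length width height
  simp [volume_increase, volume_increase_alt, PySem.List.pyRange, List.range_succ]
  ring
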